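-- pv_equiv track=rewrite | github.com/Vlad1606/SAT_Solvers_MPI | dpll.py | pure_literal
-- ===== SOURCE A (Python) =====
-- def pure_literal(clauses, model):
--     counts = {}
--     for clause in clauses:
--         for lit in clause:
--             if lit in model or -lit in model:
--                 continue
--             counts.setdefault(abs(lit), set()).add(lit > 0)
--     for var, signs in counts.items():
--         if len(signs) == 1:
--             return var if True in signs else -var
--     return None
-- ===== SOURCE B (Python) =====
-- def pure_literal(clauses, model):
--     # Brute force without any dict/index: list the unassigned literals once, then
--     # for each first occurrence of a variable test purity by re-scanning the list.
--     unassigned = [lit for clause in clauses for lit in clause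
--                   if lit not in model and -lit not in model]
--     for i, lit in enumerate(unassigned):
--         if any(abs(x) == abs(lit) for x in unassigned[:i]):
--             continue  # not the first occurrence of this variable
--         if not any(abs(x) == abs(lit) and (x > 0) != (lit > 0) for x in unassigned):
--             return lit
--     return None
-- ===== Notes on version B (the rewrite author's own statement) =====
-- stated objective: alternative
-- what changed: B builds no per-variable table at all: it lists the unassigned literals once, then for each first occurrence of a variable decides purity by re-scanning that list for an opposite-sign occurrence, returning the literal itself; A instead indexes sign sets in a dict and scans its items.
import Mathlib
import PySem

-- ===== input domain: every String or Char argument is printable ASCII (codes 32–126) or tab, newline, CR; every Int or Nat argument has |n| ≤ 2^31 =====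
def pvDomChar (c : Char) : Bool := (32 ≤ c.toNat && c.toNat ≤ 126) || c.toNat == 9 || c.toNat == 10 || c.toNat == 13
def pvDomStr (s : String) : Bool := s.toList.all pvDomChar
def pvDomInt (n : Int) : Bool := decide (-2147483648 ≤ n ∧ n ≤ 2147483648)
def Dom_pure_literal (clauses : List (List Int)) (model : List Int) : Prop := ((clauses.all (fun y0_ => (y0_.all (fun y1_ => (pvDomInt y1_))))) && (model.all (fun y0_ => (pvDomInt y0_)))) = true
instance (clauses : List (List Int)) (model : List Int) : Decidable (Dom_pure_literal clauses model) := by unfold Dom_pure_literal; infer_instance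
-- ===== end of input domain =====

-- B builds no per-variable table: it lists the unassigned literals once and decides each
-- first-seen variable's purity by re-scanning that list for an opposite-sign occurrence
-- (objective: alternative; quadratic brute force instead of A's dict of sign sets).

-- ===== PORT A =====
-- second loop of A: first var whose sign set has exactly one element
def pureLitScanA : List (Int × PySem.Set Bool) → Option Int
  | [] => none
  | (var, signs) :: rest =>
      if PySem.Set.len signs = 1 then
        some (if PySem.Set.contains signs true then var else -var)
      else pureLitScanA rest

def pure_literal (clauses : List (List Int)) (model : List Int) : Option Int :=
  let counts : PySem.Dict Int (PySem.Set Bool) :=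
    clauses.foldl (fun counts clause =>
      clause.foldl (fun counts lit =>
        if lit ∈ model ∨ -lit ∈ model then counts
        else counts.modify |lit| PySem.Set.empty
               (fun s => PySem.Set.add s (decide (lit > 0)))) counts)
      PySem.Dict.empty
  pureLitScanA counts.items

-- ===== PORT B =====
-- B's loop: pre is unassigned[:i]; skip non-first occurrences, re-scan L for an
-- opposite-sign occurrence of the same variable, return the literal if none.
def pureScanB (L : List Int) : List Int → List Int → Option Int
  | _, [] => none
  | pre, lit :: rest =>
      if pre.any (fun x => |x| == |lit|) then pureScanB L (pre ++ [lit]) rest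
      else if L.any (fun x => |x| == |lit| && (decide (x > 0) != decide (lit > 0))) then
        pureScanB L (pre ++ [lit]) rest
      else some lit

def pure_literal_alt (clauses : List (List Int)) (model : List Int) : Option Int :=
  let unassigned : List Int :=
    clauses.flatMap (fun clause =>
      clause.filter (fun lit => !(decide (lit ∈ model) || decide (-lit ∈ model))))
  pureScanB unassigned [] unassigned

-- ===== PRECONDITION & SPEC =====
def Spec_pure_literal (clauses : List (List Int)) (model : List Int) (out : Option Int) : Prop := out = pure_literal_alt clauses model
instance (clauses : List (List Int)) (model : List Int) (out : Option Int) : Decidable (Spec_pure_literal clauses model out) := by unfold Spec_pure_literal; infer_instance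

-- ===== CLAIM (what is proved, stated in full; the proofs are below) =====
def Claim_equal_pure_literal : Prop := ∀ (clauses : List (List Int)) (model : List Int), Dom_pure_literal clauses model → Spec_pure_literal clauses model (pure_literal clauses model)

-- ===== LEMMAS AND PROOFS =====

-- proof-side "ghost" program: pos/neg variable sets plus a first-appearance order list;
-- A is proved equal to it via a dict invariant, B via a scan/characterisation argument.
def ghostScan (pos neg : PySem.Set Int) : List Int → Option Int
  | [] => none
  | v :: rest =>
      if PySem.Set.contains pos v && !(PySem.Set.contains neg v) then some v
      else if PySem.Set.contains neg v && !(PySem.Set.contains pos v) then some (-v)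
      else ghostScan pos neg rest

def ghostPure (clauses : List (List Int)) (model : List Int) : Option Int :=
  let assigned : PySem.Set Int :=
    PySem.Set.union (PySem.Set.ofList model) (PySem.Set.ofList (model.map (fun m => -m)))
  let st :
      PySem.Set Int × PySem.Set Int × PySem.Set Int × List Int :=
    clauses.foldl (fun st clause =>
      clause.foldl (fun st lit =>
        if PySem.Set.contains assigned lit then st
        else
          let v := |lit|
          let so := if PySem.Set.contains st.2.2.1 v then (st.2.2.1, st.2.2.2)
                    else (PySem.Set.add st.2.2.1 v, st.2.2.2 ++ [v])
          if lit > 0 then (PySem.Set.add st.1 v, st.2.1, so.1, so.2)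
          else (st.1, PySem.Set.add st.2.1 v, so.1, so.2)) st)
      (PySem.Set.empty, PySem.Set.empty, PySem.Set.empty, ([] : List Int))
  ghostScan st.1 st.2.1 st.2.2.2

-- the loop invariant tying A's dict to the ghost (pos, neg, seen, order) state
def PLInv (d : PySem.Dict Int (PySem.Set Bool))
    (st : PySem.Set Int × PySem.Set Int × PySem.Set Int × List Int) : Prop :=
  d.keys = st.2.2.2 ∧ st.2.2.1 = st.2.2.2 ∧ st.2.2.2.Nodup ∧ st.1.Nodup ∧ st.2.1.Nodup ∧
  (∀ v, (d.getD v PySem.Set.empty).Nodup) ∧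
  (∀ v, true ∈ d.getD v PySem.Set.empty ↔ v ∈ st.1) ∧
  (∀ v, false ∈ d.getD v PySem.Set.empty ↔ v ∈ st.2.1) ∧
  (∀ v, v ∈ st.2.2.2 ↔ (v ∈ st.1 ∨ v ∈ st.2.1))

lemma mem_assigned (model : List Int) (lit : Int) :
    PySem.Set.contains
      (PySem.Set.union (PySem.Set.ofList model) (PySem.Set.ofList (model.map (fun m => -m)))) lit
      = true ↔ (lit ∈ model ∨ -lit ∈ model) := by
  rw [PySem.Set.contains_iff, PySem.Set.mem_union]
  simp only [PySem.Set.mem_ofList, List.mem_map]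
  constructor
  · rintro (h | ⟨m, hm, rfl⟩)
    · exact Or.inl h
    · exact Or.inr (by simpa using hm)
  · rintro (h | h)
    · exact Or.inl h
    · exact Or.inr ⟨-lit, h, by ring⟩

lemma bool_nodup_cases (l : List Bool) (h : l.Nodup) :
    l = [] ∨ l = [true] ∨ l = [false] ∨ l = [true, false] ∨ l = [false, true] := by
  rcases l with _ | ⟨a, _ | ⟨b, _ | ⟨c, t⟩⟩⟩
  · exact Or.inl rfl
  · cases a <;> simp
  · cases a <;> cases b <;> simp_all
  · cases a <;> cases b <;> cases c <;> simp_all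

lemma PLInv_step (model : List Int) (lit : Int)
    (d : PySem.Dict Int (PySem.Set Bool))
    (st : PySem.Set Int × PySem.Set Int × PySem.Set Int × List Int)
    (h : PLInv d st) :
    PLInv
      (if lit ∈ model ∨ -lit ∈ model then d
       else d.modify |lit| PySem.Set.empty (fun s => PySem.Set.add s (decide (lit > 0))))
      (if PySem.Set.contains
            (PySem.Set.union (PySem.Set.ofList model)
              (PySem.Set.ofList (model.map (fun m => -m)))) lit then st
       else
         let v := |lit|
         let so := if PySem.Set.contains st.2.2.1 v then (st.2.2.1, st.2.2.2)
                   else (PySem.Set.add st.2.2.1 v, st.2.2.2 ++ [v])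
         if lit > 0 then (PySem.Set.add st.1 v, st.2.1, so.1, so.2)
         else (st.1, PySem.Set.add st.2.1 v, so.1, so.2)) := by
  obtain ⟨pos, neg, seen, order⟩ := st
  obtain ⟨hk, hso, hnd, hnp, hnn, hvn, htp, hfn, hor⟩ := h
  dsimp only at hk hso hnd hnp hnn htp hfn hor ⊢
  by_cases hass : lit ∈ model ∨ -lit ∈ model
  · rw [if_pos hass, if_pos ((mem_assigned model lit).2 hass)]
    exact ⟨hk, hso, hnd, hnp, hnn, hvn, htp, hfn, hor⟩
  rw [if_neg hass, if_neg (by rw [mem_assigned model lit]; exact hass)]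
  have hkeys : (d.modify |lit| PySem.Set.empty
      (fun s => PySem.Set.add s (decide (lit > 0)))).keys
      = if |lit| ∈ order then order else order ++ [|lit|] := by
    rw [PySem.Dict.keys_modify]
    by_cases hc : |lit| ∈ order
    · rw [PySem.Dict.keys_insert_of_contains, hk, if_pos hc]
      rw [PySem.Dict.contains_iff_mem_keys, hk]; exact hc
    · rw [PySem.Dict.keys_insert_of_not_contains, hk, if_neg hc]
      rw [Bool.eq_false_iff]
      intro hcc
      exact hc (hk ▸ (PySem.Dict.contains_iff_mem_keys d |lit|).1 hcc)
  have hgetD : ∀ w : Int, (d.modify |lit| PySem.Set.empty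
      (fun s => PySem.Set.add s (decide (lit > 0)))).getD w PySem.Set.empty
      = if w = |lit| then PySem.Set.add (d.getD |lit| PySem.Set.empty) (decide (lit > 0))
        else d.getD w PySem.Set.empty := fun w =>
    PySem.Dict.getD_modify d |lit| w PySem.Set.empty _
  have hseen : (if PySem.Set.contains seen |lit| then (seen, order)
      else (PySem.Set.add seen |lit|, order ++ [|lit|]))
      = if |lit| ∈ order then ((order : PySem.Set Int), order)
        else ((order ++ [|lit|] : List Int), order ++ [|lit|]) := by
    by_cases hc : |lit| ∈ order
    · rw [if_pos (by rw [PySem.Set.contains_iff, hso]; exact hc), if_pos hc, hso]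
    · rw [if_neg (by rw [PySem.Set.contains_iff, hso]; exact hc),
        if_neg hc, hso, PySem.Set.add_of_not_mem (s := order) hc]
  have hvnd : ∀ w : Int, ((if w = |lit|
      then PySem.Set.add (d.getD |lit| PySem.Set.empty) (decide (lit > 0))
      else d.getD w PySem.Set.empty) : PySem.Set Bool).Nodup := by
    intro w
    by_cases hw : w = |lit|
    · rw [if_pos hw]; exact PySem.Set.nodup_add _ _ (hvn _)
    · rw [if_neg hw]; exact hvn w
  have hndord : (if |lit| ∈ order then order else order ++ [|lit|]).Nodup := by
    by_cases hc : |lit| ∈ order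
    · rw [if_pos hc]; exact hnd
    · rw [if_neg hc]
      refine List.Nodup.append hnd (List.nodup_singleton _) ?_
      intro a ha hb
      rw [List.mem_singleton] at hb
      exact hc (hb ▸ ha)
  have hmemord : ∀ w : Int,
      w ∈ (if |lit| ∈ order then order else order ++ [|lit|]) ↔ (w ∈ order ∨ w = |lit|) := by
    intro w
    by_cases hc : |lit| ∈ order
    · rw [if_pos hc]
      constructor
      · exact Or.inl
      · rintro (hw | rfl)
        · exact hw
        · exact hc
    · rw [if_neg hc]; simp
  by_cases hpos : lit > 0
  · rw [if_pos hpos]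
    rw [hseen]
    refine ⟨?_, ?_, ?_, PySem.Set.nodup_add pos |lit| hnp, hnn, ?_, ?_, ?_, ?_⟩
    · rw [hkeys]; by_cases hc : |lit| ∈ order <;> simp [hc]
    · by_cases hc : |lit| ∈ order <;> simp [hc]
    · by_cases hc : |lit| ∈ order <;> simp only [hc, if_true, if_false]
      · exact hnd
      · refine List.Nodup.append hnd (List.nodup_singleton _) ?_
        intro a ha hb
        rw [List.mem_singleton] at hb
        exact hc (hb ▸ ha)
    · intro w; rw [hgetD w]; exact hvnd w
    · intro w; rw [hgetD w]
      by_cases hw : w = |lit|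
      · subst hw
        rw [if_pos rfl, PySem.Set.mem_add]
        simp only [hpos, decide_true]
        rw [htp |lit|, PySem.Set.mem_add]
        tauto
      · rw [if_neg hw, htp w, PySem.Set.mem_add]
        constructor
        · exact Or.inl
        · rintro (hw2 | rfl)
          · exact hw2
          · exact absurd rfl hw
    · intro w; rw [hgetD w]
      by_cases hw : w = |lit|
      · subst hw
        rw [if_pos rfl, PySem.Set.mem_add]
        simp only [hpos, decide_true]
        rw [hfn |lit|]
        constructor
        · rintro (hw2 | hfalse)
          · exact hw2
          · exact absurd hfalse (by simp)
        · exact Or.inl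
      · rw [if_neg hw, hfn w]
    · intro w
      by_cases hc : |lit| ∈ order <;> simp only [hc, if_true, if_false] <;>
        rw [PySem.Set.mem_add]
      · constructor
        · intro hw
          rcases (hor w).1 hw with h | h
          · exact Or.inl (Or.inl h)
          · exact Or.inr h
        · rintro ((h | rfl) | h)
          · exact (hor w).2 (Or.inl h)
          · exact hc
          · exact (hor w).2 (Or.inr h)
      · simp only [List.mem_append, List.mem_singleton]
        constructor
        · rintro (hw | rfl)
          · rcases (hor w).1 hw with h | h
            · exact Or.inl (Or.inl h)
            · exact Or.inr h
          · exact Or.inl (Or.inr rfl)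
        · rintro ((h | rfl) | h)
          · exact Or.inl ((hor w).2 (Or.inl h))
          · exact Or.inr rfl
          · exact Or.inl ((hor w).2 (Or.inr h))
  · rw [if_neg hpos]
    rw [hseen]
    refine ⟨?_, ?_, ?_, hnp, PySem.Set.nodup_add neg |lit| hnn, ?_, ?_, ?_, ?_⟩
    · rw [hkeys]; by_cases hc : |lit| ∈ order <;> simp [hc]
    · by_cases hc : |lit| ∈ order <;> simp [hc]
    · by_cases hc : |lit| ∈ order <;> simp only [hc, if_true, if_false]
      · exact hnd
      · refine List.Nodup.append hnd (List.nodup_singleton _) ?_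
        intro a ha hb
        rw [List.mem_singleton] at hb
        exact hc (hb ▸ ha)
    · intro w; rw [hgetD w]; exact hvnd w
    · intro w; rw [hgetD w]
      by_cases hw : w = |lit|
      · subst hw
        rw [if_pos rfl, PySem.Set.mem_add]
        simp only [hpos, decide_false]
        rw [htp |lit|]
        constructor
        · rintro (hw2 | hfalse)
          · exact hw2
          · exact absurd hfalse (by simp)
        · exact Or.inl
      · rw [if_neg hw, htp w]
    · intro w; rw [hgetD w]
      by_cases hw : w = |lit|
      · subst hw
        rw [if_pos rfl, PySem.Set.mem_add]
        simp only [hpos, decide_false]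
        rw [hfn |lit|, PySem.Set.mem_add]
        tauto
      · rw [if_neg hw, hfn w, PySem.Set.mem_add]
        constructor
        · exact Or.inl
        · rintro (hw2 | rfl)
          · exact hw2
          · exact absurd rfl hw
    · intro w
      by_cases hc : |lit| ∈ order <;> simp only [hc, if_true, if_false] <;>
        rw [PySem.Set.mem_add]
      · constructor
        · intro hw
          rcases (hor w).1 hw with h | h
          · exact Or.inl h
          · exact Or.inr (Or.inl h)
        · rintro (h | (h | rfl))
          · exact (hor w).2 (Or.inl h)
          · exact (hor w).2 (Or.inr h)
          · exact hc
      · simp only [List.mem_append, List.mem_singleton]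
        constructor
        · rintro (hw | rfl)
          · rcases (hor w).1 hw with h | h
            · exact Or.inl h
            · exact Or.inr (Or.inl h)
          · exact Or.inr (Or.inr rfl)
        · rintro (h | (h | rfl))
          · exact Or.inl ((hor w).2 (Or.inl h))
          · exact Or.inl ((hor w).2 (Or.inr h))
          · exact Or.inr rfl

lemma PLInv_foldl (model : List Int) (lits : List Int)
    (d : PySem.Dict Int (PySem.Set Bool))
    (st : PySem.Set Int × PySem.Set Int × PySem.Set Int × List Int)
    (h : PLInv d st) :
    PLInv
      (lits.foldl (fun counts lit =>
        if lit ∈ model ∨ -lit ∈ model then counts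
        else counts.modify |lit| PySem.Set.empty
               (fun s => PySem.Set.add s (decide (lit > 0)))) d)
      (lits.foldl (fun st lit =>
        if PySem.Set.contains
            (PySem.Set.union (PySem.Set.ofList model)
              (PySem.Set.ofList (model.map (fun m => -m)))) lit then st
        else
          let v := |lit|
          let so := if PySem.Set.contains st.2.2.1 v then (st.2.2.1, st.2.2.2)
                    else (PySem.Set.add st.2.2.1 v, st.2.2.2 ++ [v])
          if lit > 0 then (PySem.Set.add st.1 v, st.2.1, so.1, so.2)
          else (st.1, PySem.Set.add st.2.1 v, so.1, so.2)) st) := by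
  induction lits generalizing d st with
  | nil => exact h
  | cons lit rest ih => exact ih _ _ (PLInv_step model lit d st h)

lemma scan_eq (d : PySem.Dict Int (PySem.Set Bool))
    (pos neg : PySem.Set Int) (order : List Int)
    (hgn : ∀ v, (d.getD v PySem.Set.empty).Nodup)
    (htp : ∀ v, true ∈ d.getD v PySem.Set.empty ↔ v ∈ pos)
    (hfn : ∀ v, false ∈ d.getD v PySem.Set.empty ↔ v ∈ neg)
    (hor : ∀ v, v ∈ order → (v ∈ pos ∨ v ∈ neg)) :
    pureLitScanA (order.map (fun k => (k, d.getD k PySem.Set.empty)))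
      = ghostScan pos neg order := by
  induction order with
  | nil => rfl
  | cons v rest ih =>
      simp only [List.map_cons, pureLitScanA, ghostScan]
      have hne : true ∈ d.getD v PySem.Set.empty ∨ false ∈ d.getD v PySem.Set.empty := by
        rcases hor v (List.mem_cons_self) with h | h
        · exact Or.inl ((htp v).2 h)
        · exact Or.inr ((hfn v).2 h)
      have hih : pureLitScanA (rest.map (fun k => (k, d.getD k PySem.Set.empty)))
          = ghostScan pos neg rest := ih (fun w hw => hor w (List.mem_cons_of_mem v hw))
      rcases bool_nodup_cases (d.getD v PySem.Set.empty) (hgn v) with hs | hs | hs | hs | hs <;>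
        rw [hs] at hne <;> rw [hs]
      · simp at hne
      · have hP : v ∈ pos := (htp v).1 (by rw [hs]; simp)
        have hN : v ∉ neg := fun h => by have h2 := (hfn v).2 h; rw [hs] at h2; simp at h2
        simp [hP, hN, PySem.Set.len]
      · have hP : v ∉ pos := fun h => by have h2 := (htp v).2 h; rw [hs] at h2; simp at h2
        have hN : v ∈ neg := (hfn v).1 (by rw [hs]; simp)
        simp [hP, hN, PySem.Set.len]
      · have hP : v ∈ pos := (htp v).1 (by rw [hs]; simp)
        have hN : v ∈ neg := (hfn v).1 (by rw [hs]; simp)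
        simpa [hP, hN, PySem.Set.len] using hih
      · have hP : v ∈ pos := (htp v).1 (by rw [hs]; simp)
        have hN : v ∈ neg := (hfn v).1 (by rw [hs]; simp)
        simpa [hP, hN, PySem.Set.len] using hih

theorem pure_literal_eq_ghost (clauses : List (List Int)) (model : List Int) :
    pure_literal clauses model = ghostPure clauses model := by
  unfold pure_literal ghostPure
  dsimp only
  rw [← List.foldl_flatten, ← List.foldl_flatten]
  have hinit : PLInv PySem.Dict.empty
      ((PySem.Set.empty : PySem.Set Int), (PySem.Set.empty : PySem.Set Int),
       (PySem.Set.empty : PySem.Set Int), ([] : List Int)) := by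
    refine ⟨rfl, rfl, List.nodup_nil, List.nodup_nil, List.nodup_nil, ?_, ?_, ?_, ?_⟩ <;>
      intro v <;> simp [PySem.Dict.getD_empty, PySem.Set.empty]
  have hinv := PLInv_foldl model clauses.flatten PySem.Dict.empty _ hinit
  obtain ⟨hk, hso, hnd, hnp, hnn, hvn, htp, hfn, hor⟩ := hinv
  rw [PySem.Dict.items_eq_map_keys _ (by rw [hk]; exact hnd) PySem.Set.empty, hk]
  exact scan_eq _ _ _ _ hvn htp hfn (fun v hv => (hor v).1 hv)

-- ===== ghost = B =====

-- the ghost fold's step, named for the proofs (definitionally the lambda in ghostPure)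
def gstep (st : PySem.Set Int × PySem.Set Int × PySem.Set Int × List Int) (lit : Int) :
    PySem.Set Int × PySem.Set Int × PySem.Set Int × List Int :=
  let v := |lit|
  let so := if PySem.Set.contains st.2.2.1 v then (st.2.2.1, st.2.2.2)
            else (PySem.Set.add st.2.2.1 v, st.2.2.2 ++ [v])
  if lit > 0 then (PySem.Set.add st.1 v, st.2.1, so.1, so.2)
  else (st.1, PySem.Set.add st.2.1 v, so.1, so.2)

-- a fold whose step skips exactly the elements a filter drops
lemma foldl_guard_filter {α β : Type} (c : α → Bool) (f : β → α → β) :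
    ∀ (M : List α) (st : β),
      M.foldl (fun st x => if c x then st else f st x) st
        = (M.filter (fun x => !c x)).foldl f st := by
  intro M
  induction M with
  | nil => intro st; rfl
  | cons x rest ih =>
      intro st
      by_cases hx : c x = true <;> simp [List.foldl_cons, List.filter_cons, hx, ih]

-- first-appearance variable list of P, relative to already-seen variables
def newVars (seen : List Int) : List Int → List Int
  | [] => []
  | lit :: rest =>
      if seen.any (fun x => x == |lit|) then newVars (seen ++ [|lit|]) rest
      else |lit| :: newVars (seen ++ [|lit|]) rest

lemma newVars_cons (seen : List Int) (lit : Int) (rest : List Int) :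
    newVars seen (lit :: rest)
      = if seen.any (fun x => x == |lit|) then newVars (seen ++ [|lit|]) rest
        else |lit| :: newVars (seen ++ [|lit|]) rest := rfl

-- characterisation of the ghost fold over an already-filtered literal list
lemma ghost_char (P : List Int) :
    ∀ (st : PySem.Set Int × PySem.Set Int × PySem.Set Int × List Int) (sl : List Int),
      (∀ v : Int, v ∈ st.2.2.1 ↔ v ∈ sl) →
      (∀ v, v ∈ (P.foldl gstep st).1 ↔ v ∈ st.1 ∨ ∃ x ∈ P, 0 < x ∧ |x| = v) ∧
      (∀ v, v ∈ (P.foldl gstep st).2.1 ↔ v ∈ st.2.1 ∨ ∃ x ∈ P, ¬0 < x ∧ |x| = v) ∧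
      (P.foldl gstep st).2.2.2 = st.2.2.2 ++ newVars sl P := by
  induction P with
  | nil =>
      intro st sl hsl
      exact ⟨fun v => by simp, fun v => by simp, by simp [newVars]⟩
  | cons lit rest ih =>
      rintro ⟨pos, neg, seen, order⟩ sl hsl
      dsimp only at hsl
      have hanysl : (sl.any (fun x => x == |lit|)) = PySem.Set.contains seen |lit| := by
        by_cases hc : |lit| ∈ sl
        · have h1 : PySem.Set.contains seen |lit| = true := by
            rw [PySem.Set.contains_iff]; exact (hsl _).2 hc
          rw [h1]; simp [List.any_eq_true]; exact hc
        · have h1 : PySem.Set.contains seen |lit| = false := by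
            rw [Bool.eq_false_iff]
            intro h; exact hc ((hsl _).1 ((PySem.Set.contains_iff _ _).mp h))
          rw [h1]
          simp only [List.any_eq_false]
          intro x hx
          simp only [beq_iff_eq]
          rintro rfl; exact hc hx
      simp only [List.foldl_cons]
      by_cases hc : PySem.Set.contains seen |lit| = true <;> by_cases hl : lit > 0 <;>
        simp only [gstep, hc, hl, if_true, if_false, Bool.false_eq_true, if_neg]
      -- case: seen, positive
      · obtain ⟨hp, hn, ho⟩ := ih (PySem.Set.add pos |lit|, neg, seen, order) (sl ++ [|lit|])
          (by
            intro v
            dsimp only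
            rw [hsl v]
            have : (|lit| : Int) ∈ sl := (hsl _).1 ((PySem.Set.contains_iff _ _).mp hc)
            simp only [List.mem_append, List.mem_singleton]
            constructor
            · exact Or.inl
            · rintro (h | rfl)
              · exact h
              · exact this)
        refine ⟨?_, ?_, ?_⟩
        · intro v
          rw [hp v]
          dsimp only
          rw [PySem.Set.mem_add]
          simp only [List.mem_cons]
          constructor
          · rintro ((h | rfl) | ⟨x, hx, hx0, hxv⟩)
            · exact Or.inl h
            · exact Or.inr ⟨lit, Or.inl rfl, hl, rfl⟩
            · exact Or.inr ⟨x, Or.inr hx, hx0, hxv⟩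
          · rintro (h | ⟨x, (rfl | hx), hx0, hxv⟩)
            · exact Or.inl (Or.inl h)
            · exact Or.inl (Or.inr hxv.symm)
            · exact Or.inr ⟨x, hx, hx0, hxv⟩
        · intro v
          rw [hn v]
          dsimp only
          simp only [List.mem_cons]
          constructor
          · rintro (h | ⟨x, hx, hx0, hxv⟩)
            · exact Or.inl h
            · exact Or.inr ⟨x, Or.inr hx, hx0, hxv⟩
          · rintro (h | ⟨x, (rfl | hx), hx0, hxv⟩)
            · exact Or.inl h
            · exact absurd hl hx0
            · exact Or.inr ⟨x, hx, hx0, hxv⟩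
        · rw [ho]
          dsimp only
          rw [newVars_cons, hanysl, hc, if_pos rfl]
      -- case: seen, nonpositive
      · obtain ⟨hp, hn, ho⟩ := ih (pos, PySem.Set.add neg |lit|, seen, order) (sl ++ [|lit|])
          (by
            intro v
            dsimp only
            rw [hsl v]
            have : (|lit| : Int) ∈ sl := (hsl _).1 ((PySem.Set.contains_iff _ _).mp hc)
            simp only [List.mem_append, List.mem_singleton]
            constructor
            · exact Or.inl
            · rintro (h | rfl)
              · exact h
              · exact this)
        refine ⟨?_, ?_, ?_⟩
        · intro v
          rw [hp v]
          dsimp only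
          simp only [List.mem_cons]
          constructor
          · rintro (h | ⟨x, hx, hx0, hxv⟩)
            · exact Or.inl h
            · exact Or.inr ⟨x, Or.inr hx, hx0, hxv⟩
          · rintro (h | ⟨x, (rfl | hx), hx0, hxv⟩)
            · exact Or.inl h
            · exact absurd hx0 hl
            · exact Or.inr ⟨x, hx, hx0, hxv⟩
        · intro v
          rw [hn v]
          dsimp only
          rw [PySem.Set.mem_add]
          simp only [List.mem_cons]
          constructor
          · rintro ((h | rfl) | ⟨x, hx, hx0, hxv⟩)
            · exact Or.inl h
            · exact Or.inr ⟨lit, Or.inl rfl, hl, rfl⟩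
            · exact Or.inr ⟨x, Or.inr hx, hx0, hxv⟩
          · rintro (h | ⟨x, (rfl | hx), hx0, hxv⟩)
            · exact Or.inl (Or.inl h)
            · exact Or.inl (Or.inr hxv.symm)
            · exact Or.inr ⟨x, hx, hx0, hxv⟩
        · rw [ho]
          dsimp only
          rw [newVars_cons, hanysl, hc, if_pos rfl]
      -- case: unseen, positive
      · obtain ⟨hp, hn, ho⟩ := ih
          (PySem.Set.add pos |lit|, neg, PySem.Set.add seen |lit|, order ++ [|lit|])
          (sl ++ [|lit|])
          (by
            intro v
            dsimp only
            rw [PySem.Set.mem_add, hsl v]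
            simp)
        refine ⟨?_, ?_, ?_⟩
        · intro v
          rw [hp v]
          dsimp only
          rw [PySem.Set.mem_add]
          simp only [List.mem_cons]
          constructor
          · rintro ((h | rfl) | ⟨x, hx, hx0, hxv⟩)
            · exact Or.inl h
            · exact Or.inr ⟨lit, Or.inl rfl, hl, rfl⟩
            · exact Or.inr ⟨x, Or.inr hx, hx0, hxv⟩
          · rintro (h | ⟨x, (rfl | hx), hx0, hxv⟩)
            · exact Or.inl (Or.inl h)
            · exact Or.inl (Or.inr hxv.symm)
            · exact Or.inr ⟨x, hx, hx0, hxv⟩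
        · intro v
          rw [hn v]
          dsimp only
          simp only [List.mem_cons]
          constructor
          · rintro (h | ⟨x, hx, hx0, hxv⟩)
            · exact Or.inl h
            · exact Or.inr ⟨x, Or.inr hx, hx0, hxv⟩
          · rintro (h | ⟨x, (rfl | hx), hx0, hxv⟩)
            · exact Or.inl h
            · exact absurd hl hx0
            · exact Or.inr ⟨x, hx, hx0, hxv⟩
        · rw [ho]
          dsimp only
          rw [newVars_cons, hanysl]
          simp only [hc, if_false, Bool.false_eq_true, List.append_assoc, List.singleton_append]
      -- case: unseen, nonpositive
      · obtain ⟨hp, hn, ho⟩ := ih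
          (pos, PySem.Set.add neg |lit|, PySem.Set.add seen |lit|, order ++ [|lit|])
          (sl ++ [|lit|])
          (by
            intro v
            dsimp only
            rw [PySem.Set.mem_add, hsl v]
            simp)
        refine ⟨?_, ?_, ?_⟩
        · intro v
          rw [hp v]
          dsimp only
          simp only [List.mem_cons]
          constructor
          · rintro (h | ⟨x, hx, hx0, hxv⟩)
            · exact Or.inl h
            · exact Or.inr ⟨x, Or.inr hx, hx0, hxv⟩
          · rintro (h | ⟨x, (rfl | hx), hx0, hxv⟩)
            · exact Or.inl h
            · exact absurd hx0 hl
            · exact Or.inr ⟨x, hx, hx0, hxv⟩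
        · intro v
          rw [hn v]
          dsimp only
          rw [PySem.Set.mem_add]
          simp only [List.mem_cons]
          constructor
          · rintro ((h | rfl) | ⟨x, hx, hx0, hxv⟩)
            · exact Or.inl h
            · exact Or.inr ⟨lit, Or.inl rfl, hl, rfl⟩
            · exact Or.inr ⟨x, Or.inr hx, hx0, hxv⟩
          · rintro (h | ⟨x, (rfl | hx), hx0, hxv⟩)
            · exact Or.inl (Or.inl h)
            · exact Or.inl (Or.inr hxv.symm)
            · exact Or.inr ⟨x, hx, hx0, hxv⟩
        · rw [ho]
          dsimp only
          rw [newVars_cons, hanysl]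
          simp only [hc, if_false, Bool.false_eq_true, List.append_assoc, List.singleton_append]

-- B's scan over the literal list equals the ghost scan over the first-appearance vars
lemma scanB_eq_ghost (L : List Int) (pos neg : PySem.Set Int)
    (hpos : ∀ v, v ∈ pos ↔ ∃ x ∈ L, 0 < x ∧ |x| = v)
    (hneg : ∀ v, v ∈ neg ↔ ∃ x ∈ L, ¬0 < x ∧ |x| = v) :
    ∀ (rest pre : List Int), pre ++ rest = L →
      pureScanB L pre rest = ghostScan pos neg (newVars (pre.map (fun x => |x|)) rest) := by
  intro rest
  induction rest with
  | nil => intro pre hpre; rfl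
  | cons lit rest' ih =>
      intro pre hpre
      have hpre' : (pre ++ [lit]) ++ rest' = L := by
        rw [List.append_assoc]; simpa using hpre
      have hlitL : lit ∈ L := by
        rw [← hpre]; simp
      have hmapany : ((pre.map (fun x => |x|)).any (fun x => x == |lit|))
          = pre.any (fun x => |x| == |lit|) := by
        rw [List.any_map]; rfl
      have hmapapp : (pre ++ [lit]).map (fun x : Int => |x|)
          = pre.map (fun x => |x|) ++ [|lit|] := by simp
      unfold pureScanB newVars
      rw [hmapany]
      by_cases h1 : pre.any (fun x => |x| == |lit|) = true
      · rw [if_pos h1, if_pos h1, ← hmapapp]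
        exact ih (pre ++ [lit]) hpre'
      · rw [if_neg h1, if_neg h1]
        have hih := ih (pre ++ [lit]) hpre'
        rw [hmapapp] at hih
        have hb2 : (L.any (fun x => |x| == |lit| && (decide (x > 0) != decide (lit > 0)))) = true
            ↔ (if lit > 0 then |lit| ∈ neg else |lit| ∈ pos) := by
          rw [List.any_eq_true]
          by_cases hl : lit > 0 <;> simp only [hl, if_true, if_false, Bool.false_eq_true, if_neg]
          · rw [hneg |lit|]
            constructor
            · rintro ⟨x, hx, hx2⟩
              simp only [hl, decide_true, Bool.and_eq_true, beq_iff_eq, bne_iff_ne, ne_eq,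
                decide_eq_true_eq] at hx2
              refine ⟨x, hx, ?_, hx2.1⟩
              intro hx0
              exact hx2.2 (by simp [hx0])
            · rintro ⟨x, hx, hx0, hxv⟩
              refine ⟨x, hx, ?_⟩
              simp [hxv, hl, hx0]
          · rw [hpos |lit|]
            constructor
            · rintro ⟨x, hx, hx2⟩
              simp only [hl, decide_false, Bool.and_eq_true, beq_iff_eq, bne_iff_ne, ne_eq,
                decide_eq_true_eq] at hx2
              have hx0 : 0 < x := by
                by_contra hx0
                exact hx2.2 (by simp [hx0])
              exact ⟨x, hx, hx0, hx2.1⟩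
            · rintro ⟨x, hx, hx0, hxv⟩
              refine ⟨x, hx, ?_⟩
              simp [hxv, hl, hx0]
        unfold ghostScan
        by_cases hl : lit > 0
        · have hP : (|lit| : Int) ∈ pos := (hpos _).2 ⟨lit, hlitL, hl, rfl⟩
          have hPc : PySem.Set.contains pos |lit| = true := (PySem.Set.contains_iff _ _).mpr hP
          by_cases hb : (L.any (fun x => |x| == |lit| && (decide (x > 0) != decide (lit > 0)))) = true
          · have hN : (|lit| : Int) ∈ neg := by
              have := hb2.1 hb; rwa [if_pos hl] at this
            have hNc : PySem.Set.contains neg |lit| = true := (PySem.Set.contains_iff _ _).mpr hN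
            rw [if_pos hb, hPc, hNc]
            simpa using hih
          · have hN : (|lit| : Int) ∉ neg := by
              intro h
              exact hb (hb2.2 (by rw [if_pos hl]; exact h))
            have hNc : PySem.Set.contains neg |lit| = false := by
              rw [Bool.eq_false_iff]
              intro h; exact hN ((PySem.Set.contains_iff _ _).mp h)
            rw [if_neg hb, hPc, hNc]
            simp [abs_of_pos hl]
        · have hN : (|lit| : Int) ∈ neg := (hneg _).2 ⟨lit, hlitL, hl, rfl⟩
          have hNc : PySem.Set.contains neg |lit| = true := (PySem.Set.contains_iff _ _).mpr hN
          by_cases hb : (L.any (fun x => |x| == |lit| && (decide (x > 0) != decide (lit > 0)))) = true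
          · have hP : (|lit| : Int) ∈ pos := by
              have := hb2.1 hb; rwa [if_neg hl] at this
            have hPc : PySem.Set.contains pos |lit| = true := (PySem.Set.contains_iff _ _).mpr hP
            rw [if_pos hb, hPc, hNc]
            simpa using hih
          · have hP : (|lit| : Int) ∉ pos := by
              intro h
              exact hb (hb2.2 (by rw [if_neg hl]; exact h))
            have hPc : PySem.Set.contains pos |lit| = false := by
              rw [Bool.eq_false_iff]
              intro h; exact hP ((PySem.Set.contains_iff _ _).mp h)
            rw [if_neg hb, hPc, hNc]
            have hlit : -|lit| = lit := by
              rw [abs_of_nonpos (by omega)]; ring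
            simp [hlit]

-- the two filter predicates (ghost's set test, B's membership test) agree
lemma filter_pred_eq (model : List Int) :
    (fun lit : Int => !PySem.Set.contains
        (PySem.Set.union (PySem.Set.ofList model)
          (PySem.Set.ofList (model.map (fun m => -m)))) lit)
      = (fun lit : Int => !(decide (lit ∈ model) || decide (-lit ∈ model))) := by
  funext lit
  congr 1
  by_cases h : lit ∈ model ∨ -lit ∈ model
  · rw [(mem_assigned model lit).2 h]
    rcases h with h | h <;> simp [h]
  · have h1 : PySem.Set.contains
        (PySem.Set.union (PySem.Set.ofList model)
          (PySem.Set.ofList (model.map (fun m => -m)))) lit = false := by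
      rw [Bool.eq_false_iff]
      intro hc; exact h ((mem_assigned model lit).1 hc)
    push_neg at h
    rw [h1]
    simp [h.1, h.2]

theorem ghost_eq_alt (clauses : List (List Int)) (model : List Int) :
    ghostPure clauses model = pure_literal_alt clauses model := by
  unfold ghostPure pure_literal_alt
  dsimp only
  rw [← List.foldl_flatten]
  have hfold :
      (clauses.flatten.foldl (fun st lit =>
        if PySem.Set.contains
            (PySem.Set.union (PySem.Set.ofList model)
              (PySem.Set.ofList (model.map (fun m => -m)))) lit then st
        else gstep st lit)
        ((PySem.Set.empty : PySem.Set Int), (PySem.Set.empty : PySem.Set Int),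
          (PySem.Set.empty : PySem.Set Int), ([] : List Int)))
      = ((clauses.flatten.filter
            (fun lit => !(decide (lit ∈ model) || decide (-lit ∈ model)))).foldl gstep
          ((PySem.Set.empty : PySem.Set Int), (PySem.Set.empty : PySem.Set Int),
            (PySem.Set.empty : PySem.Set Int), ([] : List Int))) := by
    rw [foldl_guard_filter, filter_pred_eq]
  have hL : clauses.flatMap (fun clause =>
        clause.filter (fun lit => !(decide (lit ∈ model) || decide (-lit ∈ model))))
      = clauses.flatten.filter (fun lit => !(decide (lit ∈ model) || decide (-lit ∈ model))) := by
    rw [List.filter_flatten, List.flatMap_def]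
  set L := clauses.flatten.filter
      (fun lit => !(decide (lit ∈ model) || decide (-lit ∈ model))) with hLdef
  obtain ⟨hp, hn, ho⟩ := ghost_char L
    ((PySem.Set.empty : PySem.Set Int), (PySem.Set.empty : PySem.Set Int),
      (PySem.Set.empty : PySem.Set Int), ([] : List Int)) []
    (by intro v; simp [PySem.Set.empty])
  rw [show (fun (st : PySem.Set Int × PySem.Set Int × PySem.Set Int × List Int) (lit : Int) =>
        if PySem.Set.contains
            (PySem.Set.union (PySem.Set.ofList model)
              (PySem.Set.ofList (model.map (fun m => -m)))) lit then st
        else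
          let v := |lit|
          let so := if PySem.Set.contains st.2.2.1 v then (st.2.2.1, st.2.2.2)
                    else (PySem.Set.add st.2.2.1 v, st.2.2.2 ++ [v])
          if lit > 0 then (PySem.Set.add st.1 v, st.2.1, so.1, so.2)
          else (st.1, PySem.Set.add st.2.1 v, so.1, so.2))
      = (fun st lit =>
        if PySem.Set.contains
            (PySem.Set.union (PySem.Set.ofList model)
              (PySem.Set.ofList (model.map (fun m => -m)))) lit then st
        else gstep st lit) from rfl]
  rw [hfold, hL, ho]
  exact (scanB_eq_ghost L _ _
    (fun v => by
      rw [hp v]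
      dsimp only
      simp [PySem.Set.empty])
    (fun v => by
      rw [hn v]
      dsimp only
      simp [PySem.Set.empty])
    L [] rfl).symm

-- ===== VERDICT (by name: the statement is the Claim_ definition above) =====
theorem pure_literal_spec : Claim_equal_pure_literal := by
  intro clauses model _
  unfold Spec_pure_literal
  rw [pure_literal_eq_ghost, ghost_eq_alt]
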